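-- pv_equiv track=rewrite | github.com/RusheelD/Comp-Emu | assembler.py | get_bits_from_destination
-- ===== SOURCE A (Python) =====
-- def get_bits_from_destination(destination: str):
--     destinations = destination.split(',')
--     bits = 0
--     for dest in destinations:
--         dest = dest.strip()
--         if 'A' == dest:
--             bits |= 4
--         if 'D' == dest:
--             bits |= 2
--         if 'A*' == dest or '*A' == dest:
--             bits |= 1
--     return bits
-- ===== SOURCE B (Python) =====
-- def get_bits_from_destination(destination: str):
--     TABLE = {'A': 4, 'D': 2, 'A*': 1, '*A': 1}
--     bits = 0
--     token = []
--     for ch in destination + ',':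
--         if ch == ',':
--             bits |= TABLE.get(''.join(token).strip(), 0)
--             token = []
--         else:
--             token.append(ch)
--     return bits
-- ===== Notes on version B (the rewrite author's own statement) =====
-- stated objective: alternative
-- what changed: Replaces split-then-loop-with-three-equality-branches by a single character-level scanner with an explicit token buffer (a sentinel comma flushes the last token) and a lookup table mapping token to bit, so no intermediate token list and no per-token branch chain exist.
import Mathlib
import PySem

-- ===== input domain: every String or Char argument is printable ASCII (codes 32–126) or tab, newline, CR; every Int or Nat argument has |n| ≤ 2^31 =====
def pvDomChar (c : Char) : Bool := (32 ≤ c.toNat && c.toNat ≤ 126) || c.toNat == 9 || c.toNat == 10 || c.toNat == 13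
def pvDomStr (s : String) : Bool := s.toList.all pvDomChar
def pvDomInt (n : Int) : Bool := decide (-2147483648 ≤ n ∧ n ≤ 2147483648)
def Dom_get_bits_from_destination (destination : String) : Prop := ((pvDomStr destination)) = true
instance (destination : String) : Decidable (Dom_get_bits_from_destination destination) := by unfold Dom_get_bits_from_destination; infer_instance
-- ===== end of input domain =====

-- B replaces A's split-then-loop with equality branches by a single character-level
-- scanner with a token buffer and a token→bit lookup table (alternative; same values).

-- ===== PORT A =====
-- the body of A's for-loop, step for step
def pvStepA (bits : Int) (dest : String) : Int :=
  let dest := PySem.Str.strip dest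
  let bits := if "A" == dest then PySem.Int.bor bits 4 else bits
  let bits := if "D" == dest then PySem.Int.bor bits 2 else bits
  let bits := if "A*" == dest || "*A" == dest then PySem.Int.bor bits 1 else bits
  bits

def get_bits_from_destination (destination : String) : Int :=
  let destinations := (PySem.Str.split? destination ",").getD []  -- sep "," ≠ "": split? is always some
  destinations.foldl pvStepA 0

-- ===== PORT B =====
-- B's lookup table TABLE = {'A': 4, 'D': 2, 'A*': 1, '*A': 1}
def pvTable : PySem.Dict String Int :=
  PySem.Dict.ofList [("A", 4), ("D", 2), ("A*", 1), ("*A", 1)]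

-- the body of B's for-loop over characters: state = (bits, token buffer)
def pvStepB (st : Int × List Char) (ch : Char) : Int × List Char :=
  if ch == ',' then
    (PySem.Int.bor st.1 (PySem.Dict.getD pvTable (PySem.Str.strip (String.ofList st.2)) 0), [])
  else (st.1, st.2 ++ [ch])

def get_bits_from_destination_alt (destination : String) : Int :=
  ((destination ++ ",").toList.foldl pvStepB (0, [])).1

-- ===== PRECONDITION & SPEC =====
def Spec_get_bits_from_destination (destination : String) (out : Int) : Prop := out = get_bits_from_destination_alt destination
instance (destination : String) (out : Int) : Decidable (Spec_get_bits_from_destination destination out) := by unfold Spec_get_bits_from_destination; infer_instance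

-- ===== CLAIM (what is proved, stated in full; the proofs are below) =====
def Claim_equal_get_bits_from_destination : Prop := ∀ (destination : String), Dom_get_bits_from_destination destination → Spec_get_bits_from_destination destination (get_bits_from_destination destination)

-- ===== LEMMAS AND PROOFS =====

-- split on ',' with an explicit (in-order) token accumulator; reference shape for both sides
def pvSplit1 : List Char → List Char → List (List Char)
  | [], tok => [tok]
  | c :: r, tok => if c = ',' then tok :: pvSplit1 r [] else pvSplit1 r (tok ++ [c])

-- combining one token into the bitmask, shared shape of both per-token steps
def pvTok (b : Int) (t : List Char) : Int :=
  PySem.Int.bor b (PySem.Dict.getD pvTable (PySem.Str.strip (String.ofList t)) 0)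

theorem pvSplitOn_go_eq (fuel : Nat) (l cur : List Char) (acc : List (List Char))
    (h : l.length < fuel) :
    PySem.Chars.splitOn.go [','] fuel l cur acc = acc.reverse ++ pvSplit1 l cur.reverse := by
  induction fuel generalizing l cur acc with
  | zero => omega
  | succ fuel ih =>
    cases l with
    | nil => rw [PySem.Chars.splitOn.go.eq_def]; simp [pvSplit1]
    | cons c rest =>
      rw [PySem.Chars.splitOn.go.eq_def]
      by_cases hc : c = ','
      · subst hc
        simp only [List.isPrefixOf_cons₂, List.isPrefixOf_nil_left, Bool.and_true, beq_self_eq_true,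
          if_pos, List.length_singleton, List.drop_succ_cons, List.drop_zero]
        rw [ih rest [] (cur.reverse :: acc) (by simpa using Nat.lt_of_succ_lt_succ h)]
        simp [pvSplit1]
      · have hpre : [','].isPrefixOf (c :: rest) = false := by
          simp [List.isPrefixOf_cons₂]; exact fun h' => hc h'.symm
        simp only [hpre, Bool.false_eq_true, if_false]
        rw [ih rest (c :: cur) acc (by simpa using Nat.lt_of_succ_lt_succ h)]
        simp [pvSplit1, hc]

theorem pvSplitOn_comma (l : List Char) :
    PySem.Chars.splitOn l [','] = pvSplit1 l [] := by
  have := pvSplitOn_go_eq (l.length + 1) l [] [] (Nat.lt_succ_self _)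
  simpa [PySem.Chars.splitOn] using this

-- B's character fold over a chunk ending in the sentinel comma folds pvTok over the tokens
theorem pvFoldB_eq (l : List Char) (b : Int) (tok : List Char) :
    ((l ++ [',']).foldl pvStepB (b, tok)).1 = (pvSplit1 l tok).foldl pvTok b := by
  induction l generalizing b tok with
  | nil => simp [pvStepB, pvSplit1, pvTok]
  | cons c r ih =>
    by_cases hc : c = ','
    · subst hc
      simp only [List.cons_append, List.foldl_cons, pvStepB, beq_self_eq_true, if_pos]
      rw [ih]
      simp [pvSplit1, pvTok]
    · have : (c == ',') = false := by simpa using hc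
      simp only [List.cons_append, List.foldl_cons, pvStepB, this, Bool.false_eq_true, if_false]
      rw [ih]
      simp [pvSplit1, hc]

-- A's per-token step equals B's table lookup step
theorem pvStepA_eq_pvTok (b : Int) (t : List Char) : pvStepA b (String.ofList t) = pvTok b t := by
  have hTable : pvTable = PySem.Dict.mk [("A", 4), ("D", 2), ("A*", 1), ("*A", 1)] := by decide
  simp only [pvStepA, pvTok, hTable, PySem.Dict.getD]
  generalize PySem.Str.strip (String.ofList t) = s
  by_cases h1 : s = "A"
  · subst h1; simp [PySem.Dict.get?]
  all_goals by_cases h2 : s = "D"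
  · subst h2; simp [PySem.Dict.get?]
  all_goals by_cases h3 : s = "A*"
  · subst h3; simp [PySem.Dict.get?]
  all_goals by_cases h4 : s = "*A"
  · subst h4; simp [PySem.Dict.get?]
  · have e1 : ("A" == s) = false := by simpa using fun h => h1 h.symm
    have e2 : ("D" == s) = false := by simpa using fun h => h2 h.symm
    have e3 : ("A*" == s) = false := by simpa using fun h => h3 h.symm
    have e4 : ("*A" == s) = false := by simpa using fun h => h4 h.symm
    simp [e1, e2, e3, e4, PySem.Dict.get?]

-- ===== VERDICT (by name: the statement is the Claim_ definition above) =====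
theorem get_bits_from_destination_spec : Claim_equal_get_bits_from_destination := by
  intro destination _
  unfold Spec_get_bits_from_destination get_bits_from_destination get_bits_from_destination_alt
  have hsplit : PySem.Str.split? destination "," =
      some ((pvSplit1 destination.toList []).map String.ofList) := by
    simp [PySem.Str.split?, PySem.Chars.split?, pvSplitOn_comma]
  rw [hsplit]
  have htl : (destination ++ ",").toList = destination.toList ++ [','] := by
    simp
  rw [htl, pvFoldB_eq]
  simp only [Option.getD_some, List.foldl_map]
  simp only [pvStepA_eq_pvTok]
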